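-- pv_equiv track=rewrite | github.com/ralphxiaoz/Scripts | Extract sheet headers/app.py | detect_ttx_header_row
-- ===== SOURCE A (Python) =====
-- def detect_ttx_header_row(lines, scan_rows=20):
--     """
--     Detect the header row in a tab-delimited TTX file.
--     The header is the topmost row with the same number of tabs as the majority of rows.
--     """
--     if not lines:
--         return 0
--
--     # Limit to scan_rows
--     scan_lines = lines[:min(scan_rows, len(lines))]
--
--     # Count tabs in each row
--     tab_counts = []
--     for line in scan_lines:
--         tab_count = line.count('\t')
--         tab_counts.append(tab_count)
--
--     # Find the most common tab count
--     if not tab_counts: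
--         return 0
--
--     # Count frequency of each tab count
--     from collections import Counter
--     count_freq = Counter(tab_counts)
--
--     # Get the most common tab count
--     most_common_tab_count = count_freq.most_common(1)[0][0]
--
--     # Find the first row with this tab count
--     for i, tab_count in enumerate(tab_counts):
--         if tab_count == most_common_tab_count:
--             return i
--
--     return 0
-- ===== SOURCE B (Python) =====
-- def detect_ttx_header_row(lines, scan_rows=20):
--     """
--     Detect the header row in a tab-delimited TTX file.
--     Same result as the original, but with no frequency table at all: a single
--     running-argmax pass over the scanned prefix, where each row's score is a
--     direct brute-force count of rows sharing its tab count.  A strict '>'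
--     keeps the earliest row of maximal score, which is exactly the first row
--     carrying the first-seen most common tab count.
--     """
--     if not lines:
--         return 0
--     tab_counts = [line.count('\t') for line in lines[:min(scan_rows, len(lines))]]
--     best, best_freq = -1, 0
--     for i, t in enumerate(tab_counts):
--         f = tab_counts.count(t)
--         if f > best_freq:
--             best, best_freq = i, f
--     return 0 if best < 0 else best
-- ===== Notes on version B (the rewrite author's own statement) =====
-- stated objective: alternative
-- what changed: B removes the Counter/frequency table and the mode-then-rescan control flow entirely: it makes a single running-argmax pass over the scanned rows, scoring each row by a direct list.count of rows sharing its tab count, and the strict '>' update keeps the earliest row of maximal score (which equals A's first row carrying the first-seen most common tab count).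
import Mathlib
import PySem

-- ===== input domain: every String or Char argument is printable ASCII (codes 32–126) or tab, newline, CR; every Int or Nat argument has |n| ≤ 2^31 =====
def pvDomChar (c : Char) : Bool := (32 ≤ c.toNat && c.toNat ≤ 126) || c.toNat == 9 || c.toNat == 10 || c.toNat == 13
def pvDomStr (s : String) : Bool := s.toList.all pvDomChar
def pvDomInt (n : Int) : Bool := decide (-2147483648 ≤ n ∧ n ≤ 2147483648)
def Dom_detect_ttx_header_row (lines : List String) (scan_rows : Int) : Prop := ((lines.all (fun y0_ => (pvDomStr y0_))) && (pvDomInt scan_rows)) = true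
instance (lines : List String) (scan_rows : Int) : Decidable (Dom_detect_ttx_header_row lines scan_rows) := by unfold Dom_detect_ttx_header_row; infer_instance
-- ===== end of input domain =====

-- B drops the frequency table and mode selection entirely: one running-argmax pass where each
-- row's score is a brute-force count of rows sharing its tab count (objective: alternative).

-- ===== PORT A =====
-- A's final loop: "for i, tab_count in enumerate(tab_counts): if tab_count == most: return i / return 0"
def aScan (i : Int) (ts : List Int) (most : Int) : Int :=
  match ts with
  | [] => 0
  | t :: rest => if t = most then i else aScan (i + 1) rest most

def detect_ttx_header_row (lines : List String) (scan_rows : Int) : Int :=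
  if lines = [] then 0
  else
    -- scan_lines = lines[:min(scan_rows, len(lines))]
    let scan_lines := PySem.List.slice lines none (some (min scan_rows (lines.length : Int)))
    -- tab_counts built by the appending loop
    let tab_counts := scan_lines.foldl (fun acc line => acc ++ [((PySem.Str.count line "\t" : Int))]) []
    if tab_counts = [] then 0
    else
      -- count_freq = Counter(tab_counts); most_common(1)[0] = max(items, key=itemgetter(1)) (first extremal)
      let count_freq := PySem.Dict.counter tab_counts
      match PySem.List.max? count_freq.items (fun kv => kv.2) with
      | none => 0   -- unreachable: tab_counts ≠ [] so items ≠ []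
      | some kv => aScan 0 tab_counts kv.1

-- ===== PORT B =====
def detect_ttx_header_row_alt (lines : List String) (scan_rows : Int) : Int :=
  if lines = [] then 0
  else
    -- tab_counts = [line.count('\t') for line in lines[:min(scan_rows, len(lines))]]
    let tab_counts := (PySem.List.slice lines none (some (min scan_rows (lines.length : Int)))).map
        (fun line => ((PySem.Str.count line "\t" : Int)))
    -- best, best_freq = -1, 0
    -- for i, t in enumerate(tab_counts): f = tab_counts.count(t); if f > best_freq: best, best_freq = i, f
    let st := (PySem.List.enumerate tab_counts 0).foldl
        (fun (st : Int × Int) p =>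
          let f := ((PySem.List.count tab_counts p.2 : Nat) : Int)
          if f > st.2 then (p.1, f) else st) (-1, 0)
    -- return 0 if best < 0 else best
    if st.1 < 0 then 0 else st.1

-- ===== PRECONDITION & SPEC =====
def Spec_detect_ttx_header_row (lines : List String) (scan_rows : Int) (out : Int) : Prop := out = detect_ttx_header_row_alt lines scan_rows
instance (lines : List String) (scan_rows : Int) (out : Int) : Decidable (Spec_detect_ttx_header_row lines scan_rows out) := by unfold Spec_detect_ttx_header_row; infer_instance

-- ===== CLAIM (what is proved, stated in full; the proofs are below) =====
def Claim_equal_detect_ttx_header_row : Prop := ∀ (lines : List String) (scan_rows : Int), Dom_detect_ttx_header_row lines scan_rows → Spec_detect_ttx_header_row lines scan_rows (detect_ttx_header_row lines scan_rows)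

-- ===== LEMMAS AND PROOFS =====

-- the position (starting at i) of the first element of maximal score M under c
def pvFirstIdx (c : Int → Int) (M : Int) (i : Int) : List Int → Int
  | [] => 0
  | t :: r => if c t = M then i else pvFirstIdx c M (i + 1) r

-- max? commutes with List.map (generalized over the foldl accumulator)
lemma pv_foldl_max_map {α β κ : Type} [LT κ] [DecidableLT κ] (f : α → β) (key : β → κ) :
    ∀ (l : List α) (acc : Option α),
      List.foldl (fun a x => match a with | none => some x | some m => if key m < key x then some x else some m)
        (Option.map f acc) (l.map f)
      = Option.map f (List.foldl (fun a x => match a with | none => some x | some m => if key (f m) < key (f x) then some x else some m) acc l) := by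
  intro l
  induction l with
  | nil => intro acc; rfl
  | cons x t ih =>
      intro acc
      cases acc with
      | none => simpa using ih (some x)
      | some m =>
          simp only [List.map, List.foldl]
          by_cases h : key (f m) < key (f x)
          · simp only [Option.map_some, if_pos h]; exact ih (some x)
          · simp only [Option.map_some, if_neg h]; exact ih (some m)

lemma pv_max?_map {α β κ : Type} [LT κ] [DecidableLT κ] (f : α → β) (key : β → κ) (l : List α) :
    PySem.List.max? (l.map f) key = Option.map f (PySem.List.max? l (fun x => key (f x))) := by
  simpa using pv_foldl_max_map f key l none

-- the element max? returns is the FIRST extremal one: everything before it is strictly smaller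
lemma pv_foldl_max_first {α : Type} (key : α → Int) :
    ∀ (l : List α) (b k : α),
      List.foldl (fun a x => match a with | none => some x | some m => if key m < key x then some x else some m) (some b) l = some k →
      (k = b ∧ ∀ y ∈ l, key y ≤ key b) ∨
      (∃ l1 l2, l = l1 ++ k :: l2 ∧ key b < key k ∧ ∀ y ∈ l1, key y < key k) := by
  intro l
  induction l with
  | nil => intro b k h; left; simp_all
  | cons x t ih =>
      intro b k h
      simp only [List.foldl] at h
      by_cases hx : key b < key x
      · simp only [if_pos hx] at h
        rcases ih x k h with ⟨rfl, hall⟩ | ⟨l1, l2, rfl, hlt, hall⟩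
        · right; exact ⟨[], t, rfl, hx, by simp⟩
        · right
          refine ⟨x :: l1, l2, rfl, lt_trans hx hlt, ?_⟩
          intro y hy
          rcases List.mem_cons.mp hy with rfl | hy
          · exact hlt
          · exact hall y hy
      · simp only [if_neg hx] at h
        rcases ih b k h with ⟨rfl, hall⟩ | ⟨l1, l2, rfl, hlt, hall⟩
        · left
          refine ⟨rfl, ?_⟩
          intro y hy
          rcases List.mem_cons.mp hy with rfl | hy
          · exact le_of_not_gt hx
          · exact hall y hy
        · right
          refine ⟨x :: l1, l2, rfl, hlt, ?_⟩
          intro y hy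
          rcases List.mem_cons.mp hy with rfl | hy
          · exact lt_of_le_of_lt (le_of_not_gt hx) hlt
          · exact hall y hy

lemma pv_max?_first {α : Type} (key : α → Int) (l : List α) (k : α)
    (h : PySem.List.max? l key = some k) :
    ∃ l1 l2, l = l1 ++ k :: l2 ∧ ∀ y ∈ l1, key y < key k := by
  cases l with
  | nil => simp [PySem.List.max?] at h
  | cons x t =>
      have h' : List.foldl (fun a y => match a with | none => some y | some m => if key m < key y then some y else some m) (some x) t = some k := h
      rcases pv_foldl_max_first key t x k h' with ⟨rfl, _⟩ | ⟨l1, l2, rfl, hbk, hall⟩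
      · exact ⟨[], t, rfl, by simp⟩
      · refine ⟨x :: l1, l2, rfl, ?_⟩
        intro y hy
        rcases List.mem_cons.mp hy with rfl | hy
        · exact hbk
        · exact hall y hy

-- membership in a takeWhile prefix survives appending on the right
lemma pv_mem_takeWhile_append {α : Type} (p : α → Bool) (t : α) :
    ∀ (l l2 : List α), t ∈ l.takeWhile p → t ∈ (l ++ l2).takeWhile p := by
  intro l
  induction l with
  | nil => intro l2 h; simp at h
  | cons x r ih =>
      intro l2 h
      by_cases hx : p x
      · simp only [List.cons_append, List.takeWhile_cons, hx] at h ⊢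
        rcases List.mem_cons.mp h with rfl | h
        · exact List.mem_cons_self
        · exact List.mem_cons_of_mem _ (ih l2 h)
      · simp [hx] at h

-- k ∉ l → takeWhile (· != k) l = l
lemma pv_takeWhile_ne_of_not_mem {α : Type} [BEq α] [LawfulBEq α] (k : α) (l : List α) (h : k ∉ l) :
    l.takeWhile (fun y => y != k) = l := by
  apply List.takeWhile_eq_self_iff.mpr
  intro x hx
  simp only [bne_iff_ne, ne_eq]
  intro hxe; exact h (hxe ▸ hx)

-- an element occurring in ts before the first occurrence of k occurs in Set.ofList ts before k
lemma pv_ofList_before {α : Type} [BEq α] [LawfulBEq α] (k t : α) :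
    ∀ (ts acc : List α),
      (t ∈ acc.takeWhile (fun y => y != k) ∨ (k ∉ acc ∧ t ∈ ts.takeWhile (fun y => y != k))) →
      t ∈ (List.foldl PySem.Set.add acc ts).takeWhile (fun y => y != k) := by
  intro ts
  induction ts with
  | nil =>
      intro acc h
      rcases h with h | ⟨hk, h⟩
      · exact h
      · simp at h
  | cons x r ih =>
      intro acc h
      simp only [List.foldl]
      rcases h with h | ⟨hk, h⟩
      · apply ih; left
        unfold PySem.Set.add
        split
        · exact h
        · exact pv_mem_takeWhile_append _ t acc [x] h
      · have hxk : x ≠ k := by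
          intro hxe; subst hxe; simp at h
        simp only [List.takeWhile_cons, bne_iff_ne, ne_eq, hxk, not_false_eq_true] at h
        rcases List.mem_cons.mp h with heq | h
        · subst heq
          apply ih; left
          unfold PySem.Set.add
          split
          · rename_i hc
            rw [pv_takeWhile_ne_of_not_mem k acc hk]
            simpa using hc
          · rw [pv_takeWhile_ne_of_not_mem k (acc ++ [t])]
            · simp
            · intro hm
              rcases List.mem_append.mp hm with hm | hm
              · exact hk hm
              · simp at hm; exact hxk hm.symm
        · apply ih; right
          refine ⟨?_, h⟩
          unfold PySem.Set.add
          split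
          · exact hk
          · intro hmem
            rcases List.mem_append.mp hmem with hmem | hmem
            · exact hk hmem
            · simp at hmem; exact hxk hmem.symm

-- for a Nodup list d1 ++ k :: d2, the (· != k)-prefix is exactly d1
lemma pv_takeWhile_ne_decomp {α : Type} [BEq α] [LawfulBEq α] (k : α) :
    ∀ (d1 d2 : List α), (d1 ++ k :: d2).Nodup → (d1 ++ k :: d2).takeWhile (fun y => y != k) = d1 := by
  intro d1
  induction d1 with
  | nil => intro d2 _; simp
  | cons a d1 ih =>
      intro d2 hnd
      have hak : a ≠ k := by
        have := (List.nodup_cons.mp hnd).1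
        intro hae; subst hae
        exact this (by simp)
      simp only [List.cons_append, List.takeWhile_cons, bne_iff_ne, ne_eq, hak, not_false_eq_true, if_true]
      rw [ih d2 (List.nodup_cons.mp hnd).2]

-- A's final scan (looking for the winning tab count k) lands on the first row of maximal score
lemma pv_scan_firstIdx (c : Int → Int) (k M : Int) (hk : c k = M) :
    ∀ (ts : List Int) (i : Int), k ∈ ts →
      (∀ t ∈ ts.takeWhile (fun y => y != k), c t ≠ M) →
      aScan i ts k = pvFirstIdx c M i ts := by
  intro ts
  induction ts with
  | nil => intro i h; simp at h
  | cons t rest ih =>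
      intro i hmem hbefore
      by_cases ht : t = k
      · subst ht
        simp [aScan, pvFirstIdx, hk]
      · have hcnt : c t ≠ M := by
          apply hbefore
          simp [bne_iff_ne, ht]
        simp only [aScan, pvFirstIdx, if_neg ht, if_neg hcnt]
        apply ih
        · rcases List.mem_cons.mp hmem with rfl | h
          · exact absurd rfl ht
          · exact h
        · intro t' ht'
          apply hbefore
          simp only [List.takeWhile_cons, bne_iff_ne, ne_eq, ht, not_false_eq_true]
          exact List.mem_cons_of_mem _ ht'

-- once the running max has reached the ceiling, B's loop never updates again
lemma pv_fold_stable (c : Int → Int) :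
    ∀ (l : List Int) (i b m : Int), (∀ t ∈ l, c t ≤ m) →
      (PySem.List.enumerate l i).foldl
        (fun (st : Int × Int) p => if c p.2 > st.2 then (p.1, c p.2) else st) (b, m) = (b, m) := by
  intro l
  induction l with
  | nil => intro i b m _; simp [PySem.List.enumerate_nil]
  | cons t r ih =>
      intro i b m hle
      rw [PySem.List.enumerate_cons]
      simp only [List.foldl]
      rw [if_neg (not_lt.mpr (hle t List.mem_cons_self))]
      exact ih (i + 1) b m (fun y hy => hle y (List.mem_cons_of_mem _ hy))

-- while the running max is still below the global max M, B's loop ends at the first row scoring M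
lemma pv_fold_reach (c : Int → Int) (M : Int) :
    ∀ (l : List Int) (i b m : Int),
      (∀ t ∈ l, c t ≤ M) → (∃ t ∈ l, c t = M) → m < M →
      (PySem.List.enumerate l i).foldl
        (fun (st : Int × Int) p => if c p.2 > st.2 then (p.1, c p.2) else st) (b, m)
        = (pvFirstIdx c M i l, M) := by
  intro l
  induction l with
  | nil => intro i b m _ hex _; simp at hex
  | cons t r ih =>
      intro i b m hle hex hm
      rw [PySem.List.enumerate_cons]
      simp only [List.foldl]
      by_cases htM : c t = M
      · rw [if_pos (by simpa [htM] using hm)]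
        rw [htM]
        rw [pv_fold_stable c r (i + 1) i M (fun y hy => hle y (List.mem_cons_of_mem _ hy))]
        simp [pvFirstIdx, htM]
      · have htM' : c t < M := lt_of_le_of_ne (hle t List.mem_cons_self) htM
        have hex' : ∃ t' ∈ r, c t' = M := by
          rcases hex with ⟨t', ht', hc⟩
          rcases List.mem_cons.mp ht' with rfl | ht'
          · exact absurd hc htM
          · exact ⟨t', ht', hc⟩
        have hle' : ∀ y ∈ r, c y ≤ M := fun y hy => hle y (List.mem_cons_of_mem _ hy)
        by_cases hgt : c t > m
        · rw [if_pos hgt]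
          rw [ih (i + 1) i (c t) hle' hex' htM']
          simp [pvFirstIdx, htM]
        · rw [if_neg hgt]
          rw [ih (i + 1) b m hle' hex' hm]
          simp [pvFirstIdx, htM]

-- if some row attains M, the first such position is ≥ the starting index
lemma pv_firstIdx_ge (c : Int → Int) (M : Int) :
    ∀ (l : List Int) (i : Int), (∃ t ∈ l, c t = M) → i ≤ pvFirstIdx c M i l := by
  intro l
  induction l with
  | nil => intro i hex; simp at hex
  | cons t r ih =>
      intro i hex
      by_cases htM : c t = M
      · simp [pvFirstIdx, htM]
      · simp only [pvFirstIdx, if_neg htM]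
        have hex' : ∃ t' ∈ r, c t' = M := by
          rcases hex with ⟨t', ht', hc⟩
          rcases List.mem_cons.mp ht' with rfl | ht'
          · exact absurd hc htM
          · exact ⟨t', ht', hc⟩
        have := ih (i + 1) hex'
        omega

-- ===== VERDICT (by name: the statement is the Claim_ definition above) =====
theorem detect_ttx_header_row_spec : Claim_equal_detect_ttx_header_row := by
  intro lines scan_rows _
  unfold Spec_detect_ttx_header_row detect_ttx_header_row detect_ttx_header_row_alt
  by_cases hl : lines = []
  · simp [hl]
  · simp only [if_neg hl]
    rw [PySem.List.foldl_append_singleton_eq_map]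
    simp only [List.nil_append]
    set ts := (PySem.List.slice lines none (some (min scan_rows (lines.length : Int)))).map
        (fun line => ((PySem.Str.count line "\t" : Int))) with hts
    by_cases h0 : ts = []
    · simp [h0, PySem.List.enumerate_nil]
    · simp only [if_neg h0]
      set c : Int → Int := fun t => ((List.count t ts : Nat) : Int) with hc
      -- the winning tab count: first extremal key of the counter
      have hne : PySem.Set.ofList ts ≠ [] := by
        obtain ⟨a, ha⟩ := List.exists_mem_of_ne_nil ts h0
        exact List.ne_nil_of_mem ((PySem.Set.mem_ofList ts a).mpr ha)
      obtain ⟨kstar, hmax⟩ :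
          ∃ kstar, PySem.List.max? (PySem.Set.ofList ts) (fun x => (List.count x ts : Int)) = some kstar := by
        cases hm : PySem.List.max? (PySem.Set.ofList ts) (fun x => (List.count x ts : Int)) with
        | none => exact absurd ((PySem.List.max?_eq_none_iff _ _).mp hm) hne
        | some k => exact ⟨k, rfl⟩
      rw [PySem.Dict.items_counter]
      rw [pv_max?_map (fun k => (k, (List.count k ts : Int))) (fun kv => kv.2)]
      rw [hmax]
      simp only [Option.map_some]
      have hkmem : kstar ∈ ts := (PySem.Set.mem_ofList ts kstar).mp (PySem.List.max?_mem hmax)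
      have hMle : ∀ t ∈ ts, c t ≤ c kstar := by
        intro t ht
        exact PySem.List.max?_isMax hmax t ((PySem.Set.mem_ofList ts t).mpr ht)
      -- A's scan = first row of maximal score
      rw [pv_scan_firstIdx c kstar (c kstar) rfl ts 0 hkmem]
      · -- B's loop = the same first row
        have hcount : (fun (st : Int × Int) (p : Int × Int) =>
              if ((PySem.List.count ts p.2 : Nat) : Int) > st.2 then (p.1, ((PySem.List.count ts p.2 : Nat) : Int)) else st)
            = (fun (st : Int × Int) (p : Int × Int) => if c p.2 > st.2 then (p.1, c p.2) else st) := by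
          funext st p
          simp [hc, PySem.List.count]
        rw [hcount]
        rw [pv_fold_reach c (c kstar) ts 0 (-1) 0 hMle ⟨kstar, hkmem, rfl⟩ (by
          have : 0 < List.count kstar ts := List.count_pos_iff.mpr hkmem
          simp only [hc]; exact_mod_cast this)]
        rw [if_neg (not_lt.mpr (pv_firstIdx_ge c (c kstar) ts 0 ⟨kstar, hkmem, rfl⟩))]
      · -- everything before the first occurrence of kstar scores strictly less
        intro t ht
        obtain ⟨d1, d2, hdec, hall⟩ := pv_max?_first (fun x => (List.count x ts : Int)) _ kstar hmax
        have hbef := pv_ofList_before kstar t ts [] (Or.inr ⟨by simp, ht⟩)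
        rw [show List.foldl PySem.Set.add [] ts = PySem.Set.ofList ts from rfl] at hbef
        rw [hdec, pv_takeWhile_ne_decomp kstar d1 d2 (hdec ▸ PySem.Set.nodup_ofList ts)] at hbef
        exact ne_of_lt (hall t hbef)
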